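-- pv_equiv track=rewrite | github.com/MeganHarrison/fireflies-transcripts | scripts/sync/supabase-fireflies-sync.py | _group_by_semantics
-- ===== SOURCE A (Python) =====
-- from typing import List, Dict, Any, Tuple, Optional
--
-- def _group_by_semantics(sentences: List[Dict]) -> List[List[Dict]]:
--     """Group sentences by speaker and temporal proximity"""
--     groups = []
--     current_group = []
--     last_speaker = None
--     last_time = 0
--
--     for sentence in sentences:
--         speaker = sentence.get("speaker_id", 0)
--         start_time = sentence.get("start_time", 0)
--
--         # New group if speaker changes or large time gap (>5 seconds)
--         if (speaker != last_speaker or start_time - last_time > 5000) and current_group: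
--             groups.append(current_group)
--             current_group = []
--
--         current_group.append(sentence)
--         last_speaker = speaker
--         last_time = sentence.get("end_time", start_time)
--
--     if current_group:
--         groups.append(current_group)
--
--     return groups
-- ===== SOURCE B (Python) =====
-- def _is_break(prev, cur):
--     """True when cur must start a new group after prev."""
--     return (cur.get("speaker_id", 0) != prev.get("speaker_id", 0)
--             or cur.get("start_time", 0) - prev.get("end_time", prev.get("start_time", 0)) > 5000)
--
-- def _group_by_semantics(sentences):
--     """Group sentences by speaker and temporal proximity"""
--     groups = []
--     i = 0
--     n = len(sentences)
--     while i < n: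
--         j = i + 1
--         while j < n and not _is_break(sentences[j - 1], sentences[j]):
--             j += 1
--         groups.append(sentences[i:j])
--         i = j
--     return groups
-- ===== Notes on version B (the rewrite author's own statement) =====
-- stated objective: alternative
-- what changed: Replaces A's accumulate-into-current_group state machine (groups/current_group/last_speaker/last_time carried through one fold) by a pairwise break predicate on consecutive sentences plus a scan that finds the end of each maximal run and slices it off.
import Mathlib
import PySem

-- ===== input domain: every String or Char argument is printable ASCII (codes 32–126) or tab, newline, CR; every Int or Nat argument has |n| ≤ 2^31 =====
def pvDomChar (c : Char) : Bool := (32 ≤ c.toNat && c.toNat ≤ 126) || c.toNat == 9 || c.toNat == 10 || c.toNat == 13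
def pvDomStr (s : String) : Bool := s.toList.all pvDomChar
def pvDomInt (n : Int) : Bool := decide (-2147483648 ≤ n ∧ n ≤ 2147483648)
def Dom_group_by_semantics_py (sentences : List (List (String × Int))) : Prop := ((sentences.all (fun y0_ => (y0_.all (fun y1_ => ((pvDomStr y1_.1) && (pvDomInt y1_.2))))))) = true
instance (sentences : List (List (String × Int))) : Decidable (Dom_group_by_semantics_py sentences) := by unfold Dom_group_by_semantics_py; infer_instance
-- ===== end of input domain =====

-- B replaces A's accumulate-into-current_group state machine (groups / current_group /
-- last_speaker / last_time) by scanning for the end of each maximal run with a pairwise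
-- break predicate and slicing the run off; objective: alternative decomposition, same cost.

-- d.get(k, dflt): first-match lookup in the association list (shared trivial helper)
def dictGetD (d : List (String × Int)) (k : String) (dflt : Int) : Int :=
  match d.find? (fun p => p.1 == k) with
  | some p => p.2
  | none => dflt

-- ===== PORT A =====
-- loop state: groups, current_group, last_speaker (None initially), last_time
def aLoop : List (List (String × Int)) → List (List (List (String × Int))) →
    List (List (String × Int)) → Option Int → Int → List (List (List (String × Int)))
  | [], groups, currentGroup, _, _ =>
      if currentGroup ≠ [] then groups ++ [currentGroup] else groups
  | sentence :: rest, groups, currentGroup, lastSpeaker, lastTime =>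
      let speaker := dictGetD sentence "speaker_id" 0
      let startTime := dictGetD sentence "start_time" 0
      if (some speaker ≠ lastSpeaker ∨ startTime - lastTime > 5000) ∧ currentGroup ≠ [] then
        aLoop rest (groups ++ [currentGroup]) [sentence] (some speaker)
          (dictGetD sentence "end_time" startTime)
      else
        aLoop rest groups (currentGroup ++ [sentence]) (some speaker)
          (dictGetD sentence "end_time" startTime)

def group_by_semantics_py (sentences : List (List (String × Int))) : List (List (List (String × Int))) :=
  aLoop sentences [] [] none 0

-- ===== PORT B =====
def isBreak (prev cur : List (String × Int)) : Bool :=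
  dictGetD cur "speaker_id" 0 != dictGetD prev "speaker_id" 0 ||
  dictGetD cur "start_time" 0 - dictGetD prev "end_time" (dictGetD prev "start_time" 0) > 5000

-- inner while: extend the run past j while sentences[j] does not break from sentences[j-1];
-- returns (rest of the run after its first element, remaining sentences)
def spanRun : List (List (String × Int)) → List (String × Int) →
    List (List (String × Int)) × List (List (String × Int))
  | [], _ => ([], [])
  | c :: rest, prev =>
      if isBreak prev c then ([], c :: rest)
      else
        let (r, rest') := spanRun rest c
        (c :: r, rest')

theorem spanRun_len (xs : List (List (String × Int))) (p : List (String × Int)) :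
    (spanRun xs p).2.length ≤ xs.length := by
  induction xs generalizing p with
  | nil => simp [spanRun]
  | cons c rest ih =>
    have h := ih c
    cases hsp : spanRun rest c with
    | mk r rest' =>
      rw [hsp] at h
      simp only [spanRun, hsp]
      split
      · simp
      · simp at h ⊢
        omega

-- outer while: slice off one maximal run, continue on the remainder
def bGroups : List (List (String × Int)) → List (List (List (String × Int)))
  | [] => []
  | s :: rest =>
      let pr := spanRun rest s
      (s :: pr.1) :: bGroups pr.2
  termination_by xs => xs.length
  decreasing_by
    have := spanRun_len rest s
    simp
    omega

def group_by_semantics_py_alt (sentences : List (List (String × Int))) : List (List (List (String × Int))) :=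
  bGroups sentences

-- ===== PRECONDITION & SPEC =====
def Spec_group_by_semantics_py (sentences : List (List (String × Int))) (out : List (List (List (String × Int)))) : Prop := out = group_by_semantics_py_alt sentences
instance (sentences : List (List (String × Int))) (out : List (List (List (String × Int)))) : Decidable (Spec_group_by_semantics_py sentences out) := by unfold Spec_group_by_semantics_py; infer_instance

-- ===== CLAIM (what is proved, stated in full; the proofs are below) =====
def Claim_equal_group_by_semantics_py : Prop := ∀ (sentences : List (List (String × Int))), Dom_group_by_semantics_py sentences → Spec_group_by_semantics_py sentences (group_by_semantics_py sentences)

-- ===== LEMMAS AND PROOFS =====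

def spkOf (s : List (String × Int)) : Int := dictGetD s "speaker_id" 0
def endOf (s : List (String × Int)) : Int :=
  dictGetD s "end_time" (dictGetD s "start_time" 0)

theorem isBreak_iff (p c : List (String × Int)) :
    isBreak p c = true ↔
      (some (dictGetD c "speaker_id" 0) ≠ some (spkOf p) ∨
       dictGetD c "start_time" 0 - endOf p > 5000) := by
  simp [isBreak, spkOf, endOf, bne_iff_ne]

theorem bGroups_nil : bGroups [] = [] := by rw [bGroups]

theorem bGroups_cons (s : List (String × Int)) (rest : List (List (String × Int))) :
    bGroups (s :: rest) = (s :: (spanRun rest s).1) :: bGroups (spanRun rest s).2 := by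
  rw [bGroups]

theorem aLoop_run (rest : List (List (String × Int)))
    (groups : List (List (List (String × Int)))) (cur : List (List (String × Int)))
    (p : List (String × Int)) (hcur : cur ≠ []) :
    aLoop rest groups cur (some (spkOf p)) (endOf p) =
      groups ++ ((cur ++ (spanRun rest p).1) :: bGroups (spanRun rest p).2) := by
  induction rest generalizing groups cur p with
  | nil => simp [aLoop, spanRun, hcur, bGroups_nil]
  | cons s rest ih =>
    simp only [aLoop]
    rw [show dictGetD s "end_time" (dictGetD s "start_time" 0) = endOf s from rfl]
    rw [show dictGetD s "speaker_id" 0 = spkOf s from rfl]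
    by_cases hb : isBreak p s = true
    · have hc : (some (spkOf s) ≠ some (spkOf p) ∨
          dictGetD s "start_time" 0 - endOf p > 5000) ∧ cur ≠ [] :=
        ⟨(isBreak_iff p s).mp hb, hcur⟩
      rw [if_pos hc]
      rw [ih (groups ++ [cur]) [s] s (by simp)]
      simp [spanRun, hb, bGroups_cons]
    · have hc : ¬ ((some (spkOf s) ≠ some (spkOf p) ∨
          dictGetD s "start_time" 0 - endOf p > 5000) ∧ cur ≠ []) := by
        intro ⟨h1, _⟩; exact hb ((isBreak_iff p s).mpr h1)
      rw [if_neg hc]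
      rw [ih groups (cur ++ [s]) s (by simp)]
      cases hsp : spanRun rest s with
      | mk r rest' =>
        simp [spanRun, hb, hsp]

-- ===== VERDICT (by name: the statement is the Claim_ definition above) =====
theorem group_by_semantics_py_spec : Claim_equal_group_by_semantics_py := by
  intro sentences _
  unfold Spec_group_by_semantics_py group_by_semantics_py group_by_semantics_py_alt
  cases sentences with
  | nil => simp [aLoop, bGroups_nil]
  | cons s rest =>
    have hcond : ¬ ((some (dictGetD s "speaker_id" 0) ≠ (none : Option Int) ∨
        dictGetD s "start_time" 0 - 0 > 5000) ∧ ([] : List (List (String × Int))) ≠ []) := by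
      simp
    simp only [aLoop, if_neg hcond]
    rw [show dictGetD s "end_time" (dictGetD s "start_time" 0) = endOf s from rfl]
    rw [show dictGetD s "speaker_id" 0 = spkOf s from rfl]
    rw [List.nil_append]
    rw [aLoop_run rest [] [s] s (by simp)]
    simp [bGroups_cons]
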